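-- pv_equiv track=rewrite | github.com/kelaplicativos-rgb/ia-planilhas | bling_app_zero/utils/gtin.py | _repeticao_excessiva
-- ===== SOURCE A (Python) =====
-- def _repeticao_excessiva(gtin: str) -> bool:
--     try:
--         if not gtin:
--             return False
--         maior_repeticao = max(gtin.count(d) for d in set(gtin))
--         return maior_repeticao >= max(len(gtin) - 1, 7)
--     except Exception:
--         return False
-- ===== SOURCE B (Python) =====
-- def _repeticao_excessiva(gtin: str) -> bool:
--     try:
--         if not gtin:
--             return False
--         s = sorted(gtin)
--         prev = s[0]
--         run = 1
--         best = 1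
--         for c in s[1:]:
--             if c == prev:
--                 run += 1
--             else:
--                 run = 1
--             if run > best:
--                 best = run
--             prev = c
--         return best >= max(len(gtin) - 1, 7)
--     except Exception:
--         return False
-- ===== Notes on version B (the rewrite author's own statement) =====
-- stated objective: alternative
-- what changed: replaces the per-distinct-character gtin.count rescans over set(gtin) with sort-then-longest-equal-adjacent-run scan (the maximum run length of the sorted string is the maximum character frequency)
import Mathlib
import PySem

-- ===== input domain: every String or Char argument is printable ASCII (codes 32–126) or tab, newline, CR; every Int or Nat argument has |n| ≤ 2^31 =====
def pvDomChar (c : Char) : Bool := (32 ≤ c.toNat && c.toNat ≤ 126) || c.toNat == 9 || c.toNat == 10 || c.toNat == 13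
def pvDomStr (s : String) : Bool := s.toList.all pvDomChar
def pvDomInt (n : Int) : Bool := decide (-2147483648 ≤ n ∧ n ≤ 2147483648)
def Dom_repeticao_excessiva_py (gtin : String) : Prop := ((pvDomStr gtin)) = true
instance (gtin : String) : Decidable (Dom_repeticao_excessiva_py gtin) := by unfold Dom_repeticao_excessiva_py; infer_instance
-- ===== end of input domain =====

-- B replaces A's per-distinct-character count() rescans by a sort-then-longest-equal-run scan
-- (alternative algorithm of similar cost; return values proven equal on all strings).

-- ===== PORT A =====
def repeticao_excessiva_py (gtin : String) : Bool :=
  -- try: if not gtin: return False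
  if gtin.toList = [] then false
  else
    -- maior_repeticao = max(gtin.count(d) for d in set(gtin))
    match PySem.List.max? ((PySem.Set.ofList gtin.toList).map
        (fun d => PySem.List.count gtin.toList d)) (fun x => x) with
    | none => false  -- max() on an empty sequence raises ValueError, caught by `except` (unreachable: gtin ≠ "")
    | some m => decide ((m : Int) ≥ max (PySem.Str.len gtin - 1) 7)

-- ===== PORT B =====
-- the for-loop of Source B: carries (prev, run, best) over the remaining sorted characters
def pvRunFold (prev : Char) (run best : Nat) : List Char → Nat
  | [] => best
  | c :: rest =>
      let run' := if c == prev then run + 1 else 1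
      pvRunFold c run' (if best < run' then run' else best) rest

def repeticao_excessiva_py_alt (gtin : String) : Bool :=
  match PySem.List.sorted gtin.toList (fun x => x) false with
  | [] => false  -- `if not gtin: return False` (sorted(gtin) is empty iff gtin is)
  | prev :: rest =>
      decide (((pvRunFold prev 1 1 rest : Nat) : Int) ≥ max (PySem.Str.len gtin - 1) 7)

-- ===== PRECONDITION & SPEC =====
def Spec_repeticao_excessiva_py (gtin : String) (out : Bool) : Prop := out = repeticao_excessiva_py_alt gtin
instance (gtin : String) (out : Bool) : Decidable (Spec_repeticao_excessiva_py gtin out) := by unfold Spec_repeticao_excessiva_py; infer_instance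

-- ===== CLAIM (what is proved, stated in full; the proofs are below) =====
def Claim_equal_repeticao_excessiva_py : Prop := ∀ (gtin : String), Dom_repeticao_excessiva_py gtin → Spec_repeticao_excessiva_py gtin (repeticao_excessiva_py gtin)

-- ===== LEMMAS AND PROOFS =====

-- max over xs of (count of x in base); pvMaxMult l = the maximum character multiplicity of l
def pvMaxCnt (base xs : List Char) : Nat := xs.foldl (fun a x => max a (base.count x)) 0
def pvMaxMult (l : List Char) : Nat := pvMaxCnt l l

theorem pv_le_maxCnt {base xs : List Char} {x : Char} (hx : x ∈ xs) :
    base.count x ≤ pvMaxCnt base xs :=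
  (PySem.List.le_foldl_max_nat xs (fun x => base.count x) 0).2 x hx

theorem pv_foldl_max_le (f : Char → Nat) (xs : List Char) (B : Nat) :
    ∀ init, init ≤ B → (∀ x ∈ xs, f x ≤ B) →
      xs.foldl (fun a x => max a (f x)) init ≤ B := by
  induction xs with
  | nil => intro init h _; simpa using h
  | cons c t ih =>
      intro init h hall
      simp only [List.foldl]
      exact ih _ (by have := hall c (by simp); omega) (fun x hx => hall x (by simp [hx]))

theorem pv_maxCnt_le {base xs : List Char} {B : Nat} (h : ∀ x ∈ xs, base.count x ≤ B) :
    pvMaxCnt base xs ≤ B :=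
  pv_foldl_max_le _ xs B 0 (Nat.zero_le _) h

theorem pv_foldl_max_cases (f : Char → Nat) (xs : List Char) :
    ∀ init, xs.foldl (fun a x => max a (f x)) init = init ∨
      ∃ x ∈ xs, xs.foldl (fun a x => max a (f x)) init = f x := by
  induction xs with
  | nil => intro init; left; rfl
  | cons c t ih =>
      intro init
      simp only [List.foldl]
      rcases ih (max init (f c)) with h | ⟨x, hx, h⟩
      · by_cases hc : init ≤ f c
        · right; exact ⟨c, by simp, by rw [h]; omega⟩
        · left; rw [h]; omega
      · right; exact ⟨x, by simp [hx], h⟩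

theorem pv_maxCnt_cases (base xs : List Char) :
    pvMaxCnt base xs = 0 ∨ ∃ x ∈ xs, pvMaxCnt base xs = base.count x :=
  pv_foldl_max_cases _ xs 0

theorem pv_maxCnt_ext {base xs ys : List Char} (h : ∀ x, x ∈ xs ↔ x ∈ ys) :
    pvMaxCnt base xs = pvMaxCnt base ys := by
  apply Nat.le_antisymm
  · exact pv_maxCnt_le (fun x hx => pv_le_maxCnt ((h x).mp hx))
  · exact pv_maxCnt_le (fun x hx => pv_le_maxCnt ((h x).mpr hx))

theorem pv_foldl_congr {α β : Type} (l : List α) (f g : β → α → β) :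
    ∀ init, (∀ a x, x ∈ l → f a x = g a x) → l.foldl f init = l.foldl g init := by
  induction l with
  | nil => intro init _; rfl
  | cons c t ih =>
      intro init h
      simp only [List.foldl]
      rw [h init c (by simp)]
      exact ih _ (fun a x hx => h a x (by simp [hx]))

theorem pv_maxCnt_congr {b1 b2 xs : List Char} (h : ∀ x ∈ xs, b1.count x = b2.count x) :
    pvMaxCnt b1 xs = pvMaxCnt b2 xs :=
  pv_foldl_congr xs _ _ 0 (fun a x hx => by rw [h x hx])

-- peeling one head off the maximum-multiplicity computation (unconditional)
theorem pv_maxMult_cons (c : Char) (u : List Char) :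
    pvMaxMult (c :: u) = max (1 + u.count c) (pvMaxMult (u.dropWhile (· == c))) := by
  unfold pvMaxMult
  have hsub : (u.dropWhile (· == c)).Sublist u := List.dropWhile_sublist _
  have hcc : (c :: u).count c = 1 + u.count c := by simp; omega
  apply Nat.le_antisymm
  · rcases pv_maxCnt_cases (c :: u) (c :: u) with h | ⟨x, hx, h⟩
    · rw [h]; omega
    · by_cases hxc : x = c
      · subst hxc
        rw [h, hcc]
        exact Nat.le_max_left _ _
      · have hcx : ¬ c = x := fun hh => hxc hh.symm
        have hcnt : (c :: u).count x = (u.dropWhile (· == c)).count x := by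
          have hsplit := List.takeWhile_append_dropWhile (p := (· == c)) (l := u)
          have htk : (u.takeWhile (· == c)).count x = 0 := by
            rw [List.count_eq_zero]
            intro hmem
            exact hxc (by simpa using List.mem_takeWhile_imp hmem)
          have h1 : (c :: u).count x = u.count x := by
            simp [hcx]
          have h2 : u.count x = (u.takeWhile (· == c)).count x
              + (u.dropWhile (· == c)).count x := by
            rw [← List.count_append, hsplit]
          omega
        by_cases hzero : (u.dropWhile (· == c)).count x = 0
        · rw [h, hcnt, hzero]; omega
        · have hxd : x ∈ u.dropWhile (· == c) := by
            rw [← List.count_pos_iff]; omega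
          calc pvMaxCnt (c :: u) (c :: u) = (u.dropWhile (· == c)).count x := by rw [h, hcnt]
            _ ≤ pvMaxCnt (u.dropWhile (· == c)) (u.dropWhile (· == c)) := pv_le_maxCnt hxd
            _ ≤ _ := Nat.le_max_right _ _
  · apply Nat.max_le.mpr
    constructor
    · rw [← hcc]; exact pv_le_maxCnt (by simp)
    · rcases pv_maxCnt_cases (u.dropWhile (· == c)) (u.dropWhile (· == c)) with h | ⟨x, hx, h⟩
      · rw [h]; omega
      · have hxu : x ∈ u := hsub.mem hx
        have h3 : u.count x ≤ (c :: u).count x := by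
          simp [List.count_cons]
        calc pvMaxCnt (u.dropWhile (· == c)) (u.dropWhile (· == c))
              = (u.dropWhile (· == c)).count x := h
          _ ≤ u.count x := hsub.count_le x
          _ ≤ (c :: u).count x := h3
          _ ≤ pvMaxCnt (c :: u) (c :: u) := pv_le_maxCnt (by simp [hxu])

-- the loop invariant: on a sorted tail, pvRunFold computes best ⊔ the maximum multiplicity ahead
theorem pv_runFold_eq (t : List Char) (prev : Char) (run best : Nat)
    (hs : (prev :: t).Pairwise (fun a b => a ≤ b)) (h1 : 1 ≤ run) (hrb : run ≤ best) :
    pvRunFold prev run best t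
      = max best (max (run + t.count prev) (pvMaxMult (t.dropWhile (· == prev)))) := by
  induction t generalizing prev run best with
  | nil =>
      simp only [pvRunFold, List.count_nil, List.dropWhile_nil, pvMaxMult, pvMaxCnt,
        List.foldl_nil]
      omega
  | cons c rest ih =>
      by_cases hc : c = prev
      · subst hc
        have hb : (if best ≤ run then run + 1 else best) = max best (run + 1) := by
          split <;> omega
        have hstep : pvRunFold c run best (c :: rest)
            = pvRunFold c (run + 1) (max best (run + 1)) rest := by
          simp [pvRunFold]
          rw [hb]
        have hcount : (c :: rest).count c = rest.count c + 1 := by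
          simp
        have hdrop : (c :: rest).dropWhile (· == c) = rest.dropWhile (· == c) := by
          simp [List.dropWhile]
        rw [hstep, ih c (run + 1) (max best (run + 1)) hs.of_cons (by omega) (by omega),
          hcount, hdrop]
        omega
      · have hne : (c == prev) = false := by simp [hc]
        have hb2 : (if best = 0 then 1 else best) = best := by split <;> omega
        have hstep : pvRunFold prev run best (c :: rest) = pvRunFold c 1 best rest := by
          simp [pvRunFold, hne]
          rw [hb2]
        have hple : prev ≤ c := (List.pairwise_cons.mp hs).1 c (by simp)
        have hplt : prev < c := lt_of_le_of_ne hple (fun h => hc h.symm)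
        have hnotmem : prev ∉ (c :: rest) := by
          intro hmem
          rcases List.mem_cons.mp hmem with h | h
          · exact hc h.symm
          · have := (List.pairwise_cons.mp hs.of_cons).1 prev h
            exact absurd this (not_le.mpr hplt)
        have hcount : (c :: rest).count prev = 0 := List.count_eq_zero.mpr hnotmem
        have hdrop : (c :: rest).dropWhile (· == prev) = c :: rest := by
          simp [List.dropWhile, hne]
        have hm := pv_maxMult_cons c rest
        rw [hstep, ih c 1 best hs.of_cons (by omega) (by omega), hcount, hdrop]
        omega

-- the maximum multiplicity is invariant under permutation (in particular under sorting)
theorem pv_maxMult_perm {l l' : List Char} (h : l.Perm l') : pvMaxMult l = pvMaxMult l' := by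
  unfold pvMaxMult
  calc pvMaxCnt l l = pvMaxCnt l' l := pv_maxCnt_congr (fun x _ => h.count_eq x)
    _ = pvMaxCnt l' l' := pv_maxCnt_ext (fun x => h.mem_iff)

-- A's max over set(gtin) of counts is the maximum multiplicity
theorem pv_portA_max (L : List Char) (hL : L ≠ []) :
    PySem.List.max? ((PySem.Set.ofList L).map (fun d => PySem.List.count L d)) (fun x => x)
      = some (pvMaxMult L) := by
  have hD : PySem.Set.ofList L ≠ [] := by
    cases L with
    | nil => exact absurd rfl hL
    | cons a t =>
        intro h
        have : a ∈ PySem.Set.ofList (a :: t) := (PySem.Set.mem_ofList _ _).mpr (by simp)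
        rw [h] at this
        exact absurd this (List.not_mem_nil)
  obtain ⟨d0, ds, hDe⟩ := List.exists_cons_of_ne_nil hD
  have hcnt : ∀ x, PySem.List.count L x = L.count x := fun x => PySem.List.count_eq L x
  rw [hDe]
  simp only [List.map_cons]
  rw [PySem.List.max?_id_cons]
  congr 1
  rw [List.foldl_map]
  rw [pv_foldl_congr ds (fun acc x => max acc (PySem.List.count L x))
    (fun acc x => max acc (L.count x)) _ (fun a x _ => by simp)]
  have hmem : ∀ x, x ∈ (d0 :: ds) ↔ x ∈ L := by
    intro x
    rw [← hDe]
    exact PySem.Set.mem_ofList _ _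
  have heq : pvMaxCnt L (d0 :: ds) = pvMaxMult L := by
    unfold pvMaxMult
    exact pv_maxCnt_ext hmem
  rw [← heq]
  unfold pvMaxCnt
  simp only [List.foldl_cons, hcnt, Nat.zero_max]

-- B's run scan over the sorted string is the maximum multiplicity
theorem pv_portB_max (L : List Char) (prev : Char) (rest : List Char)
    (hS : PySem.List.sorted L (fun x => x) false = prev :: rest) :
    pvRunFold prev 1 1 rest = pvMaxMult L := by
  have hperm : (prev :: rest).Perm L := hS ▸ PySem.List.sorted_perm L (fun x => x) false
  have hpw : (prev :: rest).Pairwise (fun a b => a ≤ b) := by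
    have := PySem.List.sorted_pairwise (xs := L) (key := fun x => x)
    rw [hS] at this
    exact this
  have hm := pv_maxMult_cons prev rest
  have hperm' : pvMaxMult (prev :: rest) = pvMaxMult L := pv_maxMult_perm hperm
  rw [pv_runFold_eq rest prev 1 1 hpw (by omega) (by omega)]
  omega

-- ===== VERDICT (by name: the statement is the Claim_ definition above) =====
theorem repeticao_excessiva_py_spec : Claim_equal_repeticao_excessiva_py := by
  intro gtin _
  unfold Spec_repeticao_excessiva_py repeticao_excessiva_py repeticao_excessiva_py_alt
  by_cases hL : gtin.toList = []
  · rw [if_pos hL,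
      show PySem.List.sorted gtin.toList (fun x => x) false = [] from
        (PySem.List.sorted_eq_nil_iff _ _ _).mpr hL]
  · rw [if_neg hL]
    have hS : PySem.List.sorted gtin.toList (fun x => x) false ≠ [] := by
      intro h
      exact hL ((PySem.List.sorted_eq_nil_iff _ _ _).mp h)
    obtain ⟨prev, rest, hSe⟩ := List.exists_cons_of_ne_nil hS
    rw [pv_portA_max gtin.toList hL, hSe]
    simp [pv_portB_max gtin.toList prev rest hSe]
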